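-- pv_equiv track=rewrite | github.com/moezzoub/python-modules | py03/ex4/ft_inventory_system.py | most_and_least
-- ===== SOURCE A (Python) =====
-- def most_and_least(inv):
--     most_name = None
--     most_qty = None
--     least_name = None
--     least_qty = None
--
--     for name, qty in inv.items():
--         if most_qty is None or qty > most_qty:
--             most_name = name
--             most_qty = qty
--         if least_qty is None or qty < least_qty:
--             least_name = name
--             least_qty = qty
--     return most_name, most_qty, least_name, least_qty
-- ===== SOURCE B (Python) =====
-- def most_and_least(inv):
--     if not inv:
--         return None, None, None, None
--     most = max(inv.items(), key=lambda kv: kv[1])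
--     least = min(inv.items(), key=lambda kv: kv[1])
--     return most[0], most[1], least[0], least[1]
-- ===== Notes on version B (the rewrite author's own statement) =====
-- stated objective: idiomatic
-- what changed: Replaces the fused four-variable update loop with an empty guard plus two keyed builtin scans, max(inv.items(), key=...) and min(inv.items(), key=...), whose first-extremal tie-breaking matches the original's strict comparisons.
import Mathlib
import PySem

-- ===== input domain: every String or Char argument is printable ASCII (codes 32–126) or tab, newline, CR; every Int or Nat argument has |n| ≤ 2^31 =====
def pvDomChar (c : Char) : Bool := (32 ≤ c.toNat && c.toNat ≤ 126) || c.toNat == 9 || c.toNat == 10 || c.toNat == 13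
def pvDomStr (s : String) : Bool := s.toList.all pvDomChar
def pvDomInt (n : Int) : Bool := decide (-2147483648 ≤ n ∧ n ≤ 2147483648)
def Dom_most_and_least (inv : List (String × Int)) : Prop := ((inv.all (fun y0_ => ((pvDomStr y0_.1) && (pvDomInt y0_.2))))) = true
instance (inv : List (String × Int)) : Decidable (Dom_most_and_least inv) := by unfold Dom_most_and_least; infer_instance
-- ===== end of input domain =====

-- B replaces A's fused four-variable update loop with an empty guard plus two keyed
-- max/min scans (first extremal element, matching A's strict comparisons): idiomatic.

-- ===== PORT A =====
-- the body of A's single for-loop over inv.items(): the two ifs in source order,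
-- on the state (most_name, most_qty, least_name, least_qty)
def pvBodyA (st : Option String × Option Int × Option String × Option Int)
    (nq : String × Int) : Option String × Option Int × Option String × Option Int :=
  let name := nq.1
  let qty := nq.2
  -- if most_qty is None or qty > most_qty:
  let st1 :=
    match st.2.1 with
    | none => (some name, some qty, st.2.2.1, st.2.2.2)
    | some mq => if qty > mq then (some name, some qty, st.2.2.1, st.2.2.2) else st
  -- if least_qty is None or qty < least_qty:
  match st1.2.2.2 with
  | none => (st1.1, st1.2.1, some name, some qty)
  | some lq => if qty < lq then (st1.1, st1.2.1, some name, some qty) else st1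

def most_and_least (inv : List (String × Int)) : Option String × Option Int × Option String × Option Int :=
  inv.foldl pvBodyA (none, none, none, none)

-- ===== PORT B =====
def most_and_least_alt (inv : List (String × Int)) : Option String × Option Int × Option String × Option Int :=
  if inv = [] then (none, none, none, none)
  else
    match PySem.List.max? inv (fun kv => kv.2), PySem.List.min? inv (fun kv => kv.2) with
    | some mo, some le => (some mo.1, some mo.2, some le.1, some le.2)
    | _, _ => (none, none, none, none)

-- ===== PRECONDITION & SPEC =====
def Spec_most_and_least (inv : List (String × Int)) (out : Option String × Option Int × Option String × Option Int) : Prop := out = most_and_least_alt inv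
instance (inv : List (String × Int)) (out : Option String × Option Int × Option String × Option Int) : Decidable (Spec_most_and_least inv out) := by unfold Spec_most_and_least; infer_instance

-- ===== CLAIM (what is proved, stated in full; the proofs are below) =====
def Claim_equal_most_and_least : Prop := ∀ (inv : List (String × Int)), Dom_most_and_least inv → Spec_most_and_least inv (most_and_least inv)

-- ===== LEMMAS AND PROOFS =====

-- the state of A's loop, reconstructed from the two extremal accumulators
def pvProjState (aM aL : Option (String × Int)) : Option String × Option Int × Option String × Option Int :=
  (aM.map Prod.fst, aM.map Prod.snd, aL.map Prod.fst, aL.map Prod.snd)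

-- one step of max?'s / min?'s foldl, specialised to key kv.2
def pvMaxStep (acc : Option (String × Int)) (x : String × Int) : Option (String × Int) :=
  match acc with
  | none => some x
  | some m => if m.2 < x.2 then some x else some m

def pvMinStep (acc : Option (String × Int)) (x : String × Int) : Option (String × Int) :=
  match acc with
  | none => some x
  | some m => if x.2 < m.2 then some x else some m

theorem pvBodyA_proj (aM aL : Option (String × Int)) (x : String × Int) :
    pvBodyA (pvProjState aM aL) x = pvProjState (pvMaxStep aM x) (pvMinStep aL x) := by
  cases aM with
  | none =>
    cases aL with
    | none => rfl
    | some lm =>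
      simp only [pvBodyA, pvProjState, pvMaxStep, pvMinStep, Option.map_some]
      by_cases h : x.2 < lm.2 <;> simp [h]
  | some mm =>
    cases aL with
    | none =>
      simp only [pvBodyA, pvProjState, pvMaxStep, pvMinStep, Option.map_some]
      by_cases h : mm.2 < x.2 <;> simp [h, gt_iff_lt]
    | some lm =>
      simp only [pvBodyA, pvProjState, pvMaxStep, pvMinStep, Option.map_some]
      by_cases h1 : mm.2 < x.2 <;> by_cases h2 : x.2 < lm.2 <;>
        simp [h1, h2, gt_iff_lt]

theorem pvLoop_eq (l : List (String × Int)) (aM aL : Option (String × Int)) :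
    l.foldl pvBodyA (pvProjState aM aL)
      = pvProjState (l.foldl pvMaxStep aM) (l.foldl pvMinStep aL) := by
  induction l generalizing aM aL with
  | nil => rfl
  | cons x t ih =>
    simp only [List.foldl_cons, pvBodyA_proj]
    exact ih _ _

theorem pvMaxFold_ne_none (l : List (String × Int)) (a : Option (String × Int))
    (h : l ≠ [] ∨ a ≠ none) : l.foldl pvMaxStep a ≠ none := by
  induction l generalizing a with
  | nil => simpa using h.resolve_left (by simp)
  | cons x t ih =>
    simp only [List.foldl_cons]
    apply ih
    right
    cases a with
    | none => simp [pvMaxStep]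
    | some m => simp only [pvMaxStep]; split <;> simp

theorem pvMinFold_ne_none (l : List (String × Int)) (a : Option (String × Int))
    (h : l ≠ [] ∨ a ≠ none) : l.foldl pvMinStep a ≠ none := by
  induction l generalizing a with
  | nil => simpa using h.resolve_left (by simp)
  | cons x t ih =>
    simp only [List.foldl_cons]
    apply ih
    right
    cases a with
    | none => simp [pvMinStep]
    | some m => simp only [pvMinStep]; split <;> simp

theorem pvMax?_eq_fold (l : List (String × Int)) :
    PySem.List.max? l (fun kv => kv.2) = l.foldl pvMaxStep none := by
  unfold PySem.List.max? pvMaxStep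
  congr 1
  funext acc x
  cases acc <;> rfl

theorem pvMin?_eq_fold (l : List (String × Int)) :
    PySem.List.min? l (fun kv => kv.2) = l.foldl pvMinStep none := by
  unfold PySem.List.min? pvMinStep
  congr 1
  funext acc x
  cases acc <;> rfl

-- ===== VERDICT (by name: the statement is the Claim_ definition above) =====
theorem most_and_least_spec : Claim_equal_most_and_least := by
  intro inv _
  unfold Spec_most_and_least most_and_least most_and_least_alt
  have h := pvLoop_eq inv none none
  simp only [pvProjState, Option.map_none] at h
  rw [h]
  by_cases he : inv = []
  · subst he; rfl
  · rw [if_neg he, pvMax?_eq_fold, pvMin?_eq_fold]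
    rcases hm : inv.foldl pvMaxStep none with _ | mo
    · exact absurd hm (pvMaxFold_ne_none inv none (Or.inl he))
    · rcases hl : inv.foldl pvMinStep none with _ | le
      · exact absurd hl (pvMinFold_ne_none inv none (Or.inl he))
      · rfl
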